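-- pv_equiv track=rewrite | github.com/Voneniea/PythonLab | LR1/z1f3.py | sum_divisors_condition
-- ===== SOURCE A (Python) =====
-- import math
--
-- def sum_of_digits(n):
--     return sum(int(digit) for digit in str(n))
--
-- def product_of_digits(n):
--     product = 1
--     for digit in str(n):
--         if digit != '0':
--             product *= int(digit)
--     return product
--
-- def is_coprime(a, b):
--     return math.gcd(a, b) == 1
--
-- def sum_divisors_condition(n):
--     sum_d = sum_of_digits(n)
--     prod_d = product_of_digits(n)
--     total = 0
--
--     for i in range(1, n + 1):
--         if n % i == 0 and is_coprime(i, sum_d) and not is_coprime(i, prod_d):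
--             total += i
--
--     return total
-- ===== SOURCE B (Python) =====
-- import math
--
-- def _sum_digits(n):
--     return sum(int(d) for d in str(n))
--
-- def _prod_digits(n):
--     p = 1
--     for d in str(n):
--         if d != '0':
--             p *= int(d)
--     return p
--
-- def sum_divisors_condition(n):
--     s = _sum_digits(n)
--     p = _prod_digits(n)
--     total = 0
--     d = 1
--     while d * d <= n:
--         if n % d == 0:
--             if math.gcd(d, s) == 1 and math.gcd(d, p) != 1:
--                 total += d
--             q = n // d
--             if q != d and math.gcd(q, s) == 1 and math.gcd(q, p) != 1:
--                 total += q
--         d += 1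
--     return total
-- ===== Notes on version B (the rewrite author's own statement) =====
-- stated objective: faster
-- what changed: A scans every i in 1..n testing divisibility; B enumerates divisors by trial division with d*d <= n, checking each divisor d and its cofactor n//d once.
import Mathlib
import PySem

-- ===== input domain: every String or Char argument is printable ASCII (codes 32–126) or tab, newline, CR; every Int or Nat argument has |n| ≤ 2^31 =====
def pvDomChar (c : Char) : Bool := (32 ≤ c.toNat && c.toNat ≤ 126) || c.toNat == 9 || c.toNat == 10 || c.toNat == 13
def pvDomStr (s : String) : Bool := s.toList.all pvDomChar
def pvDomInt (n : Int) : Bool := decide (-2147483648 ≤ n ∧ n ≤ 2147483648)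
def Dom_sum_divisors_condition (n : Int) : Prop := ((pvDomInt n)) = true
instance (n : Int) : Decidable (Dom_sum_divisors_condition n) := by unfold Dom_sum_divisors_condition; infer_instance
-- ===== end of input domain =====

-- B replaces A's scan of every i in 1..n by trial division up to √n, adding each divisor d and its
-- cofactor n//d once (objective: faster, O(√n) divisor enumeration instead of O(n)).

-- ===== PORT A =====
-- sum_of_digits: sum(int(digit) for digit in str(n)); int(digit) = code-48, exact because on the
-- admitted inputs (0 ≤ n) every character of str(n) is a digit '0'..'9'
def pySumOfDigits (n : Int) : Int :=
  ((PySem.Int.toChars n).map (fun c => ((c.toNat : Int) - 48))).sum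

-- product_of_digits
def pyProdOfDigits (n : Int) : Int :=
  (PySem.Int.toChars n).foldl (fun product c => if c ≠ '0' then product * ((c.toNat : Int) - 48) else product) 1

-- is_coprime(a, b) = (math.gcd(a, b) == 1); math.gcd = Int.gcd (nonnegative gcd of absolute values)
def pyIsCoprime (a b : Int) : Bool := (Int.gcd a b) == 1

def sum_divisors_condition (n : Int) : Int :=
  let sum_d := pySumOfDigits n
  let prod_d := pyProdOfDigits n
  (PySem.List.pyRange 1 (n + 1) 1).foldl
    (fun total i =>
      if PySem.Int.mod n i == 0 && pyIsCoprime i sum_d && !(pyIsCoprime i prod_d)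
      then total + i else total) 0

-- ===== PORT B =====
def altSumDigits (n : Int) : Int :=
  ((PySem.Int.toChars n).map (fun c => ((c.toNat : Int) - 48))).sum

def altProdDigits (n : Int) : Int :=
  (PySem.Int.toChars n).foldl (fun p c => if c ≠ '0' then p * ((c.toNat : Int) - 48) else p) 1

-- the while loop of Source B: d counts up while d*d ≤ n
def altLoop (n s p : Int) (d : Int) (total : Int) : Int :=
  if h : d * d ≤ n then
    let total :=
      if PySem.Int.mod n d == 0 then
        let total := if Int.gcd d s == 1 && Int.gcd d p != 1 then total + d else total
        let q := PySem.Int.floordiv n d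
        if q != d && (Int.gcd q s == 1 && Int.gcd q p != 1) then total + q else total
      else total
    altLoop n s p (d + 1) total
  else total
termination_by (n + 1 - d).toNat
decreasing_by
  have hd : d ≤ n := by nlinarith [sq_nonneg d, sq_nonneg (d - 1)]
  omega

def sum_divisors_condition_alt (n : Int) : Int :=
  altLoop n (altSumDigits n) (altProdDigits n) 1 0

-- ===== PRECONDITION & SPEC =====
-- Pre_ excludes negative n, where both A and B raise ValueError while summing the digits of str(n).
def Pre_sum_divisors_condition (n : Int) : Prop := 0 ≤ n
instance (n : Int) : Decidable (Pre_sum_divisors_condition n) := by unfold Pre_sum_divisors_condition; infer_instance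
def pvWitness_sum_divisors_condition : Int := (12)

def Spec_sum_divisors_condition (n : Int) (out : Int) : Prop := out = sum_divisors_condition_alt n
instance (n : Int) (out : Int) : Decidable (Spec_sum_divisors_condition n out) := by unfold Spec_sum_divisors_condition; infer_instance

-- ===== CLAIM (what is proved, stated in full; the proofs are below) =====
def Claim_equal_sum_divisors_condition : Prop := ∀ (n : Int), Dom_sum_divisors_condition n → Pre_sum_divisors_condition n → Spec_sum_divisors_condition n (sum_divisors_condition n)

-- ===== LEMMAS AND PROOFS =====

-- the shared gcd-condition on a candidate divisor, as a summand over Nat indices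
def pvF (s p : Int) (i : Nat) : Int :=
  if (Int.gcd (i : Int) s == 1 && !(Int.gcd (i : Int) p == 1)) then (i : Int) else 0

-- the set of divisors of n in [1, n] not yet processed when B's counter is at d
def pvDv (n d : Int) : Finset Nat :=
  (Finset.Icc 1 n.toNat).filter (fun i => (i : Int) ∣ n ∧ d ≤ (i : Int) ∧ d * (i : Int) ≤ n)

lemma pvMem_Dv {n d : Int} (hn : 0 ≤ n) (hd : 1 ≤ d) (i : Nat) :
    i ∈ pvDv n d ↔ 1 ≤ i ∧ (i : Int) ∣ n ∧ d ≤ (i : Int) ∧ d * (i : Int) ≤ n := by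
  simp only [pvDv, Finset.mem_filter, Finset.mem_Icc]
  constructor
  · rintro ⟨⟨h1, _⟩, h⟩; exact ⟨h1, h⟩
  · rintro ⟨h1, hdvd, hdi, hmul⟩
    refine ⟨⟨h1, ?_⟩, hdvd, hdi, hmul⟩
    have : (i : Int) ≤ n := by nlinarith [Int.natCast_nonneg i]
    omega

-- empty when d*d > n
lemma pvDv_empty {n d : Int} (hn : 0 ≤ n) (hd : 1 ≤ d) (h : ¬ d * d ≤ n) : pvDv n d = ∅ := by
  ext i
  simp only [Finset.notMem_empty, iff_false, pvMem_Dv hn hd]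
  rintro ⟨h1, _, hdi, hmul⟩
  exact h (le_trans (by nlinarith) hmul)

-- not a divisor: shrink d to d+1
lemma pvDv_step_nondvd {n d : Int} (hn : 0 ≤ n) (hd : 1 ≤ d) (hnd : ¬ d ∣ n) :
    pvDv n d = pvDv n (d + 1) := by
  ext i
  rw [pvMem_Dv hn hd, pvMem_Dv hn (by omega)]
  constructor
  · rintro ⟨h1, hdvd, hdi, hmul⟩
    refine ⟨h1, hdvd, ?_, ?_⟩
    · rcases lt_or_eq_of_le hdi with h | h
      · omega
      · exact absurd (h ▸ hdvd) hnd
    · by_contra hcon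
      push Not at hcon
      obtain ⟨m, hm⟩ := hdvd
      have hi1 : (1:Int) ≤ (i:Int) := by exact_mod_cast h1
      have hmd : m = d := by nlinarith
      exact hnd ⟨(i:Int), by rw [hm, hmd]; ring⟩
  · rintro ⟨h1, hdvd, hdi, hmul⟩
    exact ⟨h1, hdvd, by omega, by nlinarith [Int.natCast_nonneg i]⟩

-- divisor case, cofactor distinct: peel off both d and n/d
lemma pvDv_step_dvd_ne {n d : Int} (hn : 0 ≤ n) (hd : 1 ≤ d) (hsq : d * d ≤ n) (hnd : d ∣ n)
    (hne : n / d ≠ d) :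
    pvDv n d = insert d.toNat (insert (n / d).toNat (pvDv n (d + 1))) ∧
      d.toNat ∉ insert (n / d).toNat (pvDv n (d + 1)) ∧ (n / d).toNat ∉ pvDv n (d + 1) := by
  set q := n / d with hqdef
  have hq : d * q = n := Int.mul_ediv_cancel' hnd
  have hq1 : 1 ≤ q := by nlinarith
  have hdq : d ≤ q := by nlinarith
  have hcd : ((d.toNat : Int)) = d := Int.toNat_of_nonneg (by omega)
  have hcq : ((q.toNat : Int)) = q := Int.toNat_of_nonneg (by omega)
  refine ⟨?_, ?_, ?_⟩
  · ext i
    simp only [Finset.mem_insert, pvMem_Dv hn hd, pvMem_Dv hn (show (1:Int) ≤ d + 1 by omega)]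
    constructor
    · rintro ⟨h1, hdvd, hdi, hmul⟩
      by_cases hid : i = d.toNat
      · exact Or.inl hid
      by_cases hiq : i = q.toNat
      · exact Or.inr (Or.inl hiq)
      refine Or.inr (Or.inr ⟨h1, hdvd, ?_, ?_⟩)
      · have : (i : Int) ≠ d := fun h => hid (by omega)
        omega
      · by_contra hcon
        push Not at hcon
        obtain ⟨m, hm⟩ := hdvd
        have hi1 : (1:Int) ≤ (i:Int) := by exact_mod_cast h1
        have hmd : m = d := by nlinarith
        have : (i : Int) = q := by
          have hdpos : (0:Int) < d := by omega
          have : d * (i:Int) = d * q := by rw [hq]; rw [hm, hmd]; ring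
          exact mul_left_cancel₀ (by omega) this
        exact hiq (by omega)
    · rintro (h | h | ⟨h1, hdvd, hdi, hmul⟩)
      · subst h; exact ⟨by omega, by rw [hcd]; exact hnd, by omega, by rw [hcd]; exact hsq⟩
      · subst h
        refine ⟨by omega, ?_, by omega, by rw [hcq, hq]⟩
        rw [hcq]; exact ⟨d, by rw [← hq]; ring⟩
      · exact ⟨h1, hdvd, by omega, by nlinarith [Int.natCast_nonneg i]⟩
  · simp only [Finset.mem_insert, pvMem_Dv hn (show (1:Int) ≤ d + 1 by omega)]
    rintro (h | ⟨_, _, hdi, _⟩)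
    · exact hne (by omega)
    · omega
  · simp only [pvMem_Dv hn (show (1:Int) ≤ d + 1 by omega)]
    rintro ⟨_, _, _, hmul⟩
    rw [hcq] at hmul
    nlinarith

-- divisor case, perfect square: peel off d only
lemma pvDv_step_dvd_eq {n d : Int} (hn : 0 ≤ n) (hd : 1 ≤ d) (hsq : d * d ≤ n) (hnd : d ∣ n)
    (heq : n / d = d) :
    pvDv n d = insert d.toNat (pvDv n (d + 1)) ∧ d.toNat ∉ pvDv n (d + 1) := by
  have hq : d * (n / d) = n := Int.mul_ediv_cancel' hnd
  rw [heq] at hq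
  have hcd : ((d.toNat : Int)) = d := Int.toNat_of_nonneg (by omega)
  constructor
  · ext i
    simp only [Finset.mem_insert, pvMem_Dv hn hd, pvMem_Dv hn (show (1:Int) ≤ d + 1 by omega)]
    constructor
    · rintro ⟨h1, hdvd, hdi, hmul⟩
      by_cases hid : i = d.toNat
      · exact Or.inl hid
      refine Or.inr ⟨h1, hdvd, by omega, ?_⟩
      · by_contra hcon
        push Not at hcon
        obtain ⟨m, hm⟩ := hdvd
        have hi1 : (1:Int) ≤ (i:Int) := by exact_mod_cast h1
        have hmd : m = d := by nlinarith
        have : (i : Int) = d := by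
          have : d * (i:Int) = d * d := by rw [hq, hm, hmd]; ring
          exact mul_left_cancel₀ (by omega) this
        exact hid (by omega)
    · rintro (h | ⟨h1, hdvd, hdi, hmul⟩)
      · subst h; exact ⟨by omega, by rw [hcd]; exact hnd, by omega, by rw [hcd]; exact hsq⟩
      · exact ⟨h1, hdvd, by omega, by nlinarith [Int.natCast_nonneg i]⟩
  · simp only [pvMem_Dv hn (show (1:Int) ≤ d + 1 by omega)]
    rintro ⟨_, _, hdi, _⟩
    omega

lemma pvAltLoop_inv (n s p : Int) (hn : 0 ≤ n) :
    ∀ (k : Nat) (d : Int), 1 ≤ d → (n + 1 - d).toNat = k → ∀ total : Int,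
      altLoop n s p d total = total + ∑ i ∈ pvDv n d, pvF s p i := by
  intro k
  induction k using Nat.strong_induction_on with
  | _ k ih =>
    intro d hd hk total
    rw [altLoop]
    by_cases hsq : d * d ≤ n
    · simp only [hsq, dite_true]
      have hdn : d ≤ n := by nlinarith
      have hIH := ih (n + 1 - (d + 1)).toNat (by omega) (d + 1) (by omega) rfl
      by_cases hdvd : d ∣ n
      · have hmod : (PySem.Int.mod n d == 0) = true := by
          simp [PySem.Int.mod_eq_zero_iff_dvd, hdvd]
        simp only [hmod, if_true]
        have hfd : PySem.Int.floordiv n d = n / d :=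
          PySem.Int.floordiv_eq_ediv_of_pos (by omega)
        have hcd : ((d.toNat : Int)) = d := Int.toNat_of_nonneg (by omega)
        by_cases hne : n / d = d
        · obtain ⟨hset, hmem⟩ := pvDv_step_dvd_eq hn hd hsq hdvd hne
          have hqd : (PySem.Int.floordiv n d != d) = false := by
            simp [hfd, hne]
          simp only [hqd, Bool.false_and, Bool.false_eq_true, if_false]
          have h1 : pvF s p d.toNat = if Int.gcd d s == 1 && Int.gcd d p != 1 then d else 0 := by
            simp only [pvF, hcd, bne]
            try rfl
          rw [hIH, hset, Finset.sum_insert hmem, h1]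
          by_cases hc : (Int.gcd d s == 1 && Int.gcd d p != 1) = true <;> simp [hc] <;> first | rfl | ring
        · obtain ⟨hset, hmem1, hmem2⟩ := pvDv_step_dvd_ne hn hd hsq hdvd hne
          have hcq : (((n / d).toNat : Int)) = n / d := by
            have hq : d * (n / d) = n := Int.mul_ediv_cancel' hdvd
            have : 1 ≤ n / d := by nlinarith
            exact Int.toNat_of_nonneg (by omega)
          have hqd : (PySem.Int.floordiv n d != d) = true := by
            simp [hfd, hne]
          simp only [hfd]
          rw [hIH, hset, Finset.sum_insert hmem1, Finset.sum_insert hmem2]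
          have h1 : pvF s p d.toNat = if Int.gcd d s == 1 && Int.gcd d p != 1 then d else 0 := by
            simp only [pvF, hcd, bne]
            try rfl
          have h2 : pvF s p (n / d).toNat
              = if Int.gcd (n / d) s == 1 && Int.gcd (n / d) p != 1 then n / d else 0 := by
            simp only [pvF, hcq, bne]
            try rfl
          rw [h1, h2]
          by_cases hc1 : (Int.gcd d s == 1 && Int.gcd d p != 1) = true <;>
            by_cases hc2 : (Int.gcd (n / d) s == 1 && Int.gcd (n / d) p != 1) = true <;>
            simp [hc1, hc2, hne] <;> first | rfl | ring
      · have hmod : (PySem.Int.mod n d == 0) = false := by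
          simp [PySem.Int.mod_eq_zero_iff_dvd, hdvd]
        simp only [hmod, Bool.false_eq_true, if_false]
        rw [hIH, pvDv_step_nondvd hn hd hdvd]
    · simp only [hsq, dite_false]
      rw [pvDv_empty hn hd hsq]
      simp

lemma pvA_eq_sum (n : Int) (hn : 0 ≤ n) :
    sum_divisors_condition n = ∑ i ∈ pvDv n 1, pvF (pySumOfDigits n) (pyProdOfDigits n) i := by
  set s := pySumOfDigits n
  set p := pyProdOfDigits n
  have hfun : (fun (total i : Int) =>
      if PySem.Int.mod n i == 0 && pyIsCoprime i s && !(pyIsCoprime i p) then total + i else total)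
      = (fun total i => total + (if PySem.Int.mod n i == 0 && pyIsCoprime i s && !(pyIsCoprime i p) then i else 0)) := by
    funext t i; split <;> simp
  show (PySem.List.pyRange 1 (n + 1) 1).foldl _ 0 = _
  rw [hfun, PySem.List.foldl_add, PySem.List.pyRange_one]
  have h1 : ((n + 1) - 1).toNat = n.toNat := by omega
  rw [h1, List.map_map]
  have h2 : ∀ (g : Int → Int), (List.map (g ∘ fun (k : Nat) => (1:Int) + (k:Int)) (List.range n.toNat)).sum
      = ∑ k ∈ Finset.range n.toNat, g (1 + (k:Int)) := fun g => rfl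
  rw [h2 (fun i => if PySem.Int.mod n i == 0 && pyIsCoprime i s && !(pyIsCoprime i p) then i else 0)]
  rw [show (∑ i ∈ pvDv n 1, pvF s p i) = ∑ i ∈ Finset.Icc 1 n.toNat,
      (if ((i : Int) ∣ n ∧ (1:Int) ≤ (i : Int) ∧ 1 * (i : Int) ≤ n) then pvF s p i else 0) from by
    rw [pvDv, Finset.sum_filter]]
  rw [show Finset.Icc 1 n.toNat = Finset.Ico 1 (n.toNat + 1) from by ext x; simp,
      Finset.sum_Ico_eq_sum_range]
  have h3 : n.toNat + 1 - 1 = n.toNat := by omega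
  rw [h3, zero_add]
  apply Finset.sum_congr rfl
  intro k hk
  simp only [Finset.mem_range] at hk
  have hci : ((1 + k : Nat) : Int) = 1 + (k : Int) := by push_cast; ring
  rw [hci]
  have hdvd := PySem.Int.mod_eq_zero_iff_dvd n (1 + (k:Int))
  have hle : 1 + (k : Int) ≤ n := by omega
  simp only [pvF, hci, pyIsCoprime]
  by_cases hd : (1 + (k:Int)) ∣ n
  · simp [hdvd.mpr hd, hd, hle, show (1:Int) ≤ 1 + (k:Int) by omega, one_mul]
  · have : ¬ PySem.Int.mod n (1 + (k:Int)) = 0 := fun h => hd (hdvd.mp h)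
    simp [this, hd]

lemma pvAlt_helpers : altSumDigits = pySumOfDigits ∧ altProdDigits = pyProdOfDigits := ⟨rfl, rfl⟩

-- ===== VERDICT (by name: the statement is the Claim_ definition above) =====
theorem sum_divisors_condition_spec : Claim_equal_sum_divisors_condition := by
  intro n _ hpre
  unfold Spec_sum_divisors_condition sum_divisors_condition_alt
  rw [pvA_eq_sum n hpre, pvAlt_helpers.1, pvAlt_helpers.2,
      pvAltLoop_inv n (pySumOfDigits n) (pyProdOfDigits n) hpre ((n + 1 - 1).toNat) 1 le_rfl rfl 0,
      zero_add]
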